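-- pv_equiv track=rewrite | github.com/Richard5656/Rthon-1 | Rthon/Data/map.py | map_parser
-- ===== SOURCE A (Python) =====
-- def map_parser(map_to_parse): #turns maps into 2d arrays
--     i = 0
--     d1 = []
--     d2 = []
--     while i < len(map_to_parse):
--
--         if(map_to_parse[i] == "\n"):
--             d2.append(d1)
--             d1 = []
--         else:
--             d1.append(map_to_parse[i])
--         i+=1
--     return d2
-- ===== SOURCE B (Python) =====
-- def map_parser(map_to_parse):
--     return [list(line) for line in map_to_parse.split("\n")[:-1]]
-- ===== Notes on version B (the rewrite author's own statement) =====
-- stated objective: idiomatic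
-- what changed: Replaces the char-by-char index loop with two growing accumulator lists by a split-on-newline plus per-line list() comprehension (dropping the final unterminated segment).
import Mathlib
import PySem

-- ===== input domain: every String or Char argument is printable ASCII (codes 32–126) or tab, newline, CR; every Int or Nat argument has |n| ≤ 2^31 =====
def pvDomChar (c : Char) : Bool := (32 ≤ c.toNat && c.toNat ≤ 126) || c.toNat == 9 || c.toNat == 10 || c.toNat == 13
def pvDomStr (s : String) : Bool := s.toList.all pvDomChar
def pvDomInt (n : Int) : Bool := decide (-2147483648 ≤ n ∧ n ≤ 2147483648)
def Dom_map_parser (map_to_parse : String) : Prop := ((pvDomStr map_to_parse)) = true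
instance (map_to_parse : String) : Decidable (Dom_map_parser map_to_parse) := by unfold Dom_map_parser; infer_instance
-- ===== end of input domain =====

-- B replaces A's char-by-char accumulator loop with split("\n") plus a per-line
-- list() comprehension over all parts but the last (idiomatic; same return value).

-- ===== PORT A =====
-- A's while loop reads map_to_parse[i] for i = 0 .. len-1, i.e. visits the
-- characters in order; state is the pair (d1, d2) of the current line and output.
def map_parser (map_to_parse : String) : List (List String) :=
  (map_to_parse.toList.foldl
    (fun (st : List String × List (List String)) c =>
      if c = '\n' then ([], st.2 ++ [st.1]) else (st.1 ++ [c.toString], st.2))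
    ([], [])).2

-- ===== PORT B =====
-- map_to_parse.split("\n") ported via PySem.Chars.splitOn on .toList (the Str
-- wrapper form of split with a non-empty separator); [:-1] is PySem.List.slice;
-- list(line) turns each line into its one-character strings.
def map_parser_alt (map_to_parse : String) : List (List String) :=
  (PySem.List.slice (PySem.Chars.splitOn map_to_parse.toList ['\n']) none (some (-1))).map
    (fun line => line.map (fun c => c.toString))

-- ===== PRECONDITION & SPEC =====
def Spec_map_parser (map_to_parse : String) (out : List (List String)) : Prop := out = map_parser_alt map_to_parse
instance (map_to_parse : String) (out : List (List String)) : Decidable (Spec_map_parser map_to_parse out) := by unfold Spec_map_parser; infer_instance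

-- ===== CLAIM (what is proved, stated in full; the proofs are below) =====
def Claim_equal_map_parser : Prop := ∀ (map_to_parse : String), Dom_map_parser map_to_parse → Spec_map_parser map_to_parse (map_parser map_to_parse)

-- ===== LEMMAS AND PROOFS =====

-- reference recursion: split a char list at '\n', carrying the current line `pre`
def pvSplitNl (pre : List Char) : List Char → List (List Char)
  | [] => [pre]
  | c :: rest => if c = '\n' then pre :: pvSplitNl [] rest else pvSplitNl (pre ++ [c]) rest

theorem pvSplitNl_ne_nil (pre : List Char) (l : List Char) : pvSplitNl pre l ≠ [] := by
  induction l generalizing pre with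
  | nil => simp [pvSplitNl]
  | cons c rest ih =>
    simp only [pvSplitNl]
    split
    · simp
    · exact ih _

-- PySem's fueled splitOn.go, specialised to the single-char separator '\n',
-- computes pvSplitNl (fuel ≥ length suffices)
theorem splitOn_go_eq (l : List Char) (fuel : Nat) (cur : List Char)
    (acc : List (List Char)) (h : l.length ≤ fuel) :
    PySem.Chars.splitOn.go ['\n'] fuel l cur acc
      = acc.reverse ++ pvSplitNl cur.reverse l := by
  induction l generalizing fuel cur acc with
  | nil =>
    cases fuel with
    | zero => simp [PySem.Chars.splitOn.go, pvSplitNl]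
    | succ n => simp [PySem.Chars.splitOn.go, pvSplitNl]
  | cons c rest ih =>
    cases fuel with
    | zero => simp at h
    | succ n =>
      simp only [PySem.Chars.splitOn.go]
      by_cases hc : c = '\n'
      · subst hc
        rw [if_pos (by simp [List.isPrefixOf])]
        simp only [List.length_cons, List.length_nil, List.drop_succ_cons, List.drop_zero]
        rw [ih n [] (cur.reverse :: acc) (by simpa using h)]
        simp [pvSplitNl]
      · rw [if_neg (by simp [List.isPrefixOf]; exact fun e => hc e.symm)]
        rw [ih n (c :: cur) acc (by simpa using h)]
        simp [pvSplitNl, hc]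

theorem splitOn_eq_pvSplitNl (l : List Char) :
    PySem.Chars.splitOn l ['\n'] = pvSplitNl [] l := by
  simpa using splitOn_go_eq l (l.length + 1) [] [] (by omega)

-- A's fold computes acc ++ the mapped dropLast of pvSplitNl
theorem fold_eq (l : List Char) (cur : List Char) (acc : List (List String)) :
    (l.foldl
      (fun (st : List String × List (List String)) c =>
        if c = '\n' then ([], st.2 ++ [st.1]) else (st.1 ++ [c.toString], st.2))
      (cur.map (fun c => c.toString), acc)).2
    = acc ++ (pvSplitNl cur l).dropLast.map (fun line => line.map (fun c => c.toString)) := by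
  induction l generalizing cur acc with
  | nil => simp [pvSplitNl]
  | cons c rest ih =>
    simp only [List.foldl_cons, pvSplitNl]
    by_cases hc : c = '\n'
    · subst hc
      rw [if_pos rfl, if_pos rfl]
      have := ih ([] : List Char) (acc ++ [cur.map (fun c => c.toString)])
      simp only [List.map_nil] at this
      rw [this]
      rw [List.dropLast_cons_of_ne_nil (pvSplitNl_ne_nil [] rest)]
      simp
    · rw [if_neg hc, if_neg hc]
      have := ih (cur ++ [c]) acc
      simp only [List.map_append, List.map_cons, List.map_nil] at this
      exact this

-- ===== VERDICT (by name: the statement is the Claim_ definition above) =====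
theorem map_parser_spec : Claim_equal_map_parser := by
  intro s _
  unfold Spec_map_parser map_parser map_parser_alt
  rw [splitOn_eq_pvSplitNl, PySem.List.slice_to_neg_one]
  have := fold_eq s.toList [] []
  simpa using this
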